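-- pv_equiv track=rewrite | github.com/Ynewtime/markitai | src/markit/converters/markitdown.py | _clean_excel_markdown
-- ===== SOURCE A (Python) =====
-- def _clean_excel_markdown(markdown: str) -> str:
--     """Clean up Excel-generated markdown.
--
--     - Replace NaN with empty string in table cells
--     - Clean up table formatting
--     """
--     # Replace NaN in table cells with empty string
--     # Pattern: | NaN | or | NaN at end of line
--     # We need to be careful not to match "NaN" within actual content
--
--     # Split by lines and process each line
--     lines = markdown.split("\n")
--     cleaned_lines = []
--
--     for line in lines:
--         if "|" in line:
--             # Process table row - split by |, clean NaN, rejoin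
--             parts = line.split("|")
--             cleaned_parts = []
--             for part in parts:
--                 # Check if this cell is exactly "NaN" (with optional whitespace)
--                 stripped = part.strip()
--                 if stripped == "NaN":
--                     cleaned_parts.append(" ")
--                 else:
--                     cleaned_parts.append(part)
--             line = "|".join(cleaned_parts)
--         cleaned_lines.append(line)
--
--     return "\n".join(cleaned_lines)
-- ===== SOURCE B (Python) =====
-- _WS = " \t\n\r\x0b\x0c"
--
--
-- def _skip_ws(line, i):
--     while i < len(line) and line[i] in _WS:
--         i += 1
--     return i
--
--
-- def _nan_cell_end(line, i):
--     """If a whole cell equal to optional-whitespace 'NaN' optional-whitespace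
--     starts at position i, return the index just past it; else None."""
--     j = _skip_ws(line, i)
--     if line[j:j + 3] != "NaN":
--         return None
--     j = _skip_ws(line, j + 3)
--     if j == len(line) or line[j] == "|":
--         return j
--     return None
--
--
-- def _clean_line(line):
--     out = []
--     i = 0
--     cell_start = True  # at the start of the line or just after a '|'
--     while i < len(line):
--         if cell_start:
--             j = _nan_cell_end(line, i)
--             if j is not None:
--                 out.append(" ")
--                 i = j
--                 cell_start = False
--                 continue
--         c = line[i]
--         out.append(c)
--         cell_start = c == "|"
--         i += 1
--     return "".join(out)
--
--
-- def _clean_excel_markdown(markdown: str) -> str: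
--     return "\n".join(
--         _clean_line(line) if "|" in line else line
--         for line in markdown.split("\n")
--     )
-- ===== Notes on version B (the rewrite author's own statement) =====
-- stated objective: alternative
-- what changed: B replaces A's per-line pipe-split, per-cell strip and rejoin pipeline by a single left-to-right character scan of each table line that recognises whole optionally-whitespace-padded NaN cells at cell starts and replaces them in place.
import Mathlib
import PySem

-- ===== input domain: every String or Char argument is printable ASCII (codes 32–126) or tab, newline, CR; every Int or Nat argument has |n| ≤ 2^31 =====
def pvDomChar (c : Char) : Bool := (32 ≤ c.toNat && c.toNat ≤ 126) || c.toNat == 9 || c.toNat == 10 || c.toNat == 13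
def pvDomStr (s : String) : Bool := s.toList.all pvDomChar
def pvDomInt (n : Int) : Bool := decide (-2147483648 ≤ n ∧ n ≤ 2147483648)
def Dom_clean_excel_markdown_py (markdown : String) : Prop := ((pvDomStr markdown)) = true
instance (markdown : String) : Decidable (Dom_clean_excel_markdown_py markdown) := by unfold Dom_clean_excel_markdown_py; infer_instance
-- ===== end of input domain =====

-- B replaces A's per-line pipe-split / per-cell strip / rejoin pipeline by a single
-- left-to-right character scan of each table line that replaces whole NaN cells
-- (optionally whitespace-padded) in place (objective: alternative single-pass algorithm, similar cost).


-- ===== PORT A =====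
-- cell body of A's inner loop: a cell whose strip() is "NaN" becomes " "
def pvCleanPartA (part : List Char) : List Char :=
  let stripped := PySem.Chars.strip part
  if stripped = ['N', 'a', 'N'] then [' '] else part

-- body of A's outer loop over lines
def pvCleanLineA (line : List Char) : List Char :=
  if PySem.Chars.isIn ['|'] line then
    PySem.Chars.join ['|'] ((PySem.Chars.splitOn line ['|']).map pvCleanPartA)
  else line

def clean_excel_markdown_py (markdown : String) : String :=
  let lines := PySem.Chars.splitOn markdown.toList ['\n']
  String.ofList (PySem.Chars.join ['\n'] (lines.map pvCleanLineA))

-- ===== PORT B =====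
-- membership in Source B's _WS = " \t\n\r\x0b\x0c"
def pvIsWS (c : Char) : Bool :=
  c == ' ' || c == '\t' || c == '\n' || c == '\r' || c == '\x0b' || c == '\x0c'

-- port of _nan_cell_end: works on the suffix of the line starting at position i and
-- returns the suffix just past the matched cell (None stays none); the two _skip_ws
-- index loops are List.dropWhile on the suffix, line[j:j+3] == "NaN" is the pattern match
def pvMatchNanCell (cs : List Char) : Option (List Char) :=
  match cs.dropWhile pvIsWS with
  | 'N' :: 'a' :: 'N' :: rest =>
    match rest.dropWhile pvIsWS with
    | [] => some []
    | '|' :: t => some ('|' :: t)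
    | _ => none
  | _ => none

-- termination helper for the scanner: a successful match consumes at least "NaN"
theorem pvMatchNanCell_some_length (cs r : List Char) (h : pvMatchNanCell cs = some r) :
    r.length + 3 ≤ cs.length := by
  unfold pvMatchNanCell at h
  have hd : (cs.dropWhile pvIsWS).length ≤ cs.length := (List.dropWhile_suffix pvIsWS).length_le
  split at h
  case h_1 rest heq =>
    rw [heq] at hd
    have hr : (rest.dropWhile pvIsWS).length ≤ rest.length := (List.dropWhile_suffix pvIsWS).length_le
    split at h
    · simp at h; subst h; simp at hd ⊢; omega
    case h_2 t heq2 =>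
      rw [heq2] at hr
      injection h with h; subst h
      simp at hd hr ⊢; omega
    · cases h
  case h_2 => cases h

-- port of _clean_line's while loop: structural recursion on the unread suffix,
-- cellStart tracks Source B's cell_start flag
def pvCleanLineB (cellStart : Bool) (cs : List Char) : List Char :=
  match cs with
  | [] => []
  | c :: rest =>
    if cellStart then
      match hm : pvMatchNanCell (c :: rest) with
      | some r => ' ' :: pvCleanLineB false r
      | none => c :: pvCleanLineB (c == '|') rest
    else c :: pvCleanLineB (c == '|') rest
termination_by cs.length
decreasing_by
  all_goals simp
  have := pvMatchNanCell_some_length _ _ hm; simp at this; omega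

def clean_excel_markdown_py_alt (markdown : String) : String :=
  let lines := PySem.Chars.splitOn markdown.toList ['\n']
  String.ofList (PySem.Chars.join ['\n'] (lines.map (fun line =>
    if PySem.Chars.isIn ['|'] line then pvCleanLineB true line else line)))

-- ===== PRECONDITION & SPEC =====
def Spec_clean_excel_markdown_py (markdown : String) (out : String) : Prop := out = clean_excel_markdown_py_alt markdown
instance (markdown : String) (out : String) : Decidable (Spec_clean_excel_markdown_py markdown out) := by unfold Spec_clean_excel_markdown_py; infer_instance

-- ===== CLAIM (what is proved, stated in full; the proofs are below) =====
def Claim_equal_clean_excel_markdown_py : Prop := ∀ (markdown : String), Dom_clean_excel_markdown_py markdown → Spec_clean_excel_markdown_py markdown (clean_excel_markdown_py markdown)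

-- ===== LEMMAS AND PROOFS =====

-- reference splitter: Python's str.split(sep) for a one-character sep
def pvSplitP (s : Char) (pre l : List Char) : List (List Char) :=
  match l with
  | [] => [pre]
  | c :: rest => if c = s then pre :: pvSplitP s [] rest else pvSplitP s (pre ++ [c]) rest

theorem pvGo_spec (s : Char) (l : List Char) : ∀ (fuel : Nat) (cur : List Char) (acc : List (List Char)), l.length < fuel →
    PySem.Chars.splitOn.go [s] fuel l cur acc = acc.reverse ++ pvSplitP s cur.reverse l := by
  induction l with
  | nil =>
    intro fuel cur acc hf
    match fuel with
    | f + 1 =>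
      rw [PySem.Chars.splitOn.go]
      · simp [pvSplitP]
      · omega
  | cons c rest ih =>
    intro fuel cur acc hf
    simp only [List.length_cons] at hf
    match fuel with
    | f + 1 =>
      rw [PySem.Chars.splitOn.go]
      by_cases hcs : s = c
      · subst hcs
        simp only [List.isPrefixOf, BEq.rfl, Bool.true_and, if_pos,
          List.length_singleton, List.drop_succ_cons, List.drop_zero]
        rw [ih f [] (cur.reverse :: acc) (by omega)]
        simp [pvSplitP]
      · have hb : ([s].isPrefixOf (c :: rest)) = false := by
          simp only [List.isPrefixOf, Bool.and_true]
          exact beq_eq_false_iff_ne.mpr hcs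
        rw [if_neg (by simp [hb])]
        rw [ih f (c :: cur) acc (by omega)]
        have hstep : pvSplitP s cur.reverse (c :: rest) = pvSplitP s (cur.reverse ++ [c]) rest := by
          simp only [pvSplitP]
          rw [if_neg (fun hh => hcs hh.symm)]
        rw [hstep, List.reverse_cons]

theorem pvSplitOn_eq_splitP (s : Char) (l : List Char) :
    PySem.Chars.splitOn l [s] = pvSplitP s [] l := by
  have := pvGo_spec s l (l.length + 1) [] [] (by omega)
  simpa [PySem.Chars.splitOn] using this

theorem pvSplitP_ne_nil (s : Char) (pre l : List Char) : pvSplitP s pre l ≠ [] := by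
  induction l generalizing pre with
  | nil => simp [pvSplitP]
  | cons c rest ih => by_cases h : c = s <;> simp [pvSplitP, h, ih]

theorem pvMem_splitP (s : Char) (l : List Char) : ∀ (pre : List Char) (p : List Char), p ∈ pvSplitP s pre l →
    ∀ x ∈ p, x ∈ pre ∨ x ∈ l := by
  induction l with
  | nil => intro pre p hp x hx; simp [pvSplitP] at hp; subst hp; exact Or.inl hx
  | cons c rest ih =>
    intro pre p hp x hx
    simp only [pvSplitP] at hp
    by_cases h : c = s
    · rw [if_pos h] at hp
      rcases List.mem_cons.mp hp with hp | hp
      · subst hp; exact Or.inl hx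
      · rcases ih [] p hp x hx with h' | h'
        · simp at h'
        · simp [h']
    · rw [if_neg h] at hp
      rcases ih (pre ++ [c]) p hp x hx with h' | h'
      · simp at h'; rcases h' with h' | h'
        · exact Or.inl h'
        · simp [h']
      · simp [h']

theorem pvSplitP_sep_not_mem (s : Char) (l : List Char) : ∀ (pre : List Char), s ∉ pre →
    ∀ p ∈ pvSplitP s pre l, s ∉ p := by
  induction l with
  | nil => intro pre hpre p hp; simp [pvSplitP] at hp; subst hp; exact hpre
  | cons c rest ih =>
    intro pre hpre p hp
    simp only [pvSplitP] at hp
    by_cases h : c = s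
    · rw [if_pos h] at hp
      rcases List.mem_cons.mp hp with hp | hp
      · subst hp; exact hpre
      · exact ih [] (by simp) p hp
    · rw [if_neg h] at hp
      refine ih (pre ++ [c]) ?_ p hp
      simp only [List.mem_append, List.mem_singleton]
      rintro (hh | hh)
      · exact hpre hh
      · exact h hh.symm

theorem pvIntercalate_splitP (s : Char) (l : List Char) : ∀ (pre : List Char),
    List.intercalate [s] (pvSplitP s pre l) = pre ++ l := by
  induction l with
  | nil => intro pre; simp [pvSplitP, List.intercalate]
  | cons c rest ih =>
    intro pre
    simp only [pvSplitP]
    by_cases h : c = s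
    · rw [if_pos h]
      have h2 := ih []
      rcases hsp : pvSplitP s [] rest with _ | ⟨q, qs⟩
      · exact absurd hsp (pvSplitP_ne_nil s [] rest)
      · rw [hsp] at h2
        simp [List.intercalate] at h2 ⊢
        simp [h2, h]
    · rw [if_neg h, ih (pre ++ [c])]; simp

-- whitespace-trim used by the scanner's characterisation (Source B's _WS on both ends)
def pvStripW (l : List Char) : List Char :=
  ((l.dropWhile pvIsWS).reverse.dropWhile pvIsWS).reverse

def pvCleanW (p : List Char) : List Char :=
  if pvStripW p = ['N', 'a', 'N'] then [' '] else p

theorem pvCharEqToNat (c d : Char) (h : c.toNat = d.toNat) : c = d :=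
  Char.ext (UInt32.toNat_inj.mp h)

theorem pvCharBeq (c d : Char) : (c == d) = decide (c.toNat = d.toNat) := by
  by_cases h : c = d
  · simp [h]
  · have h2 : c.toNat ≠ d.toNat := fun hh => h (pvCharEqToNat c d hh)
    simp [h, h2]

-- on domain characters, Source B's _WS agrees with str.strip's whitespace
theorem pvWS_agree (c : Char) (h : pvDomChar c = true) : pvIsWS c = PySem.Chars.isspace c := by
  have h' := h
  simp only [pvDomChar, Bool.or_eq_true, Bool.and_eq_true, decide_eq_true_eq,
    beq_iff_eq] at h'
  rw [Bool.eq_iff_iff]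
  simp only [pvIsWS, PySem.Chars.isspace, pvCharBeq, Bool.or_eq_true, Bool.and_eq_true,
    decide_eq_true_eq]
  have e1 : (' ' : Char).toNat = 32 := rfl
  have e2 : ('\t' : Char).toNat = 9 := rfl
  have e3 : ('\n' : Char).toNat = 10 := rfl
  have e4 : ('\r' : Char).toNat = 13 := rfl
  have e5 : ('\x0b' : Char).toNat = 11 := rfl
  have e6 : ('\x0c' : Char).toNat = 12 := rfl
  rw [e1, e2, e3, e4, e5, e6]
  omega

theorem pvDropWhile_congr (l : List Char) (h : ∀ x ∈ l, pvDomChar x = true) :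
    l.dropWhile PySem.Chars.isspace = l.dropWhile pvIsWS := by
  induction l with
  | nil => rfl
  | cons c rest ih =>
    rw [List.dropWhile_cons, List.dropWhile_cons, ← pvWS_agree c (h c (by simp))]
    by_cases hw : pvIsWS c = true
    · rw [if_pos hw, if_pos hw]; exact ih (fun x hx => h x (by simp [hx]))
    · rw [if_neg hw, if_neg hw]

theorem pvStrip_eq_stripW (l : List Char) (h : ∀ x ∈ l, pvDomChar x = true) :
    PySem.Chars.strip l = pvStripW l := by
  unfold PySem.Chars.strip PySem.Chars.rstrip PySem.Chars.lstrip pvStripW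
  rw [pvDropWhile_congr l h]
  rw [pvDropWhile_congr ((l.dropWhile pvIsWS).reverse)
    (fun x hx => h x ((List.dropWhile_suffix pvIsWS).subset (List.mem_reverse.mp hx)))]

theorem pvIsWS_pipe : pvIsWS '|' = false := rfl
theorem pvIsWS_N : pvIsWS 'N' = false := rfl

-- the scanner copies a pipe-free block verbatim while cell_start is false
theorem pvScan_copy (c : List Char) (hc : '|' ∉ c) (r : List Char) :
    pvCleanLineB false (c ++ r) = c ++ pvCleanLineB false r := by
  induction c with
  | nil => simp
  | cons x xs ih =>
    have hx : (x == '|') = false := beq_eq_false_iff_ne.mpr (fun hh => hc (by simp [hh]))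
    rw [List.cons_append, pvCleanLineB]
    simp only [if_neg (by simp : ¬(false = true)), hx]
    rw [ih (fun hh => hc (by simp [hh])), List.cons_append]

theorem pvScan_false_pipe (t : List Char) :
    pvCleanLineB false ('|' :: t) = '|' :: pvCleanLineB true t := by
  rw [pvCleanLineB]; simp

theorem pvScan_true_some (x : Char) (rest r : List Char)
    (h : pvMatchNanCell (x :: rest) = some r) :
    pvCleanLineB true (x :: rest) = ' ' :: pvCleanLineB false r := by
  rw [pvCleanLineB]
  simp only [if_true]
  cases hE : pvMatchNanCell (x :: rest) with
  | some r' => rw [hE] at h; injection h with h; subst h; rfl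
  | none => rw [hE] at h; cases h

theorem pvScan_true_none (x : Char) (rest : List Char)
    (h : pvMatchNanCell (x :: rest) = none) :
    pvCleanLineB true (x :: rest) = x :: pvCleanLineB (x == '|') rest := by
  rw [pvCleanLineB]
  simp only [if_true]
  cases hE : pvMatchNanCell (x :: rest) with
  | some r' => rw [hE] at h; cases h
  | none => rfl

-- dropWhile distributes over ++ when the second block starts with '|' (or is empty)
theorem pvDropWhile_append_sfx (sfx : List Char) (hsfx : sfx = [] ∨ ∃ t, sfx = '|' :: t)
    (u : List Char) : (u ++ sfx).dropWhile pvIsWS = u.dropWhile pvIsWS ++ sfx := by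
  have hwsfx : sfx.dropWhile pvIsWS = sfx := by
    rcases hsfx with rfl | ⟨t, rfl⟩
    · rfl
    · rw [List.dropWhile_cons, pvIsWS_pipe]; simp
  rw [List.dropWhile_append]
  by_cases hd : (u.dropWhile pvIsWS).isEmpty
  · rw [if_pos hd, hwsfx, List.isEmpty_iff.mp hd, List.nil_append]
  · rw [if_neg hd]

-- match characterisation at a cell start: c is the pipe-free cell, sfx = [] or '|'::t
theorem pvMatch_char (c sfx : List Char) (hc : '|' ∉ c)
    (hsfx : sfx = [] ∨ ∃ t, sfx = '|' :: t) :
    pvMatchNanCell (c ++ sfx) = if pvStripW c = ['N', 'a', 'N'] then some sfx else none := by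
  unfold pvMatchNanCell
  rw [pvDropWhile_append_sfx sfx hsfx c]
  have hdsub : ∀ x ∈ c.dropWhile pvIsWS, x ∈ c := fun x hx => (List.dropWhile_suffix pvIsWS).subset hx
  have hpipe : ∀ x ∈ c.dropWhile pvIsWS, x ≠ '|' := fun x hx hxx => hc (hxx ▸ hdsub x hx)
  split
  case h_1 rest heq =>
    rcases hdq : c.dropWhile pvIsWS with _ | ⟨x1, _ | ⟨x2, _ | ⟨x3, m⟩⟩⟩ <;> rw [hdq] at heq
    · rcases hsfx with rfl | ⟨t, rfl⟩ <;> simp at heq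
    · rcases hsfx with rfl | ⟨t, rfl⟩ <;> simp at heq
    · rcases hsfx with rfl | ⟨t, rfl⟩ <;> simp at heq
    · simp only [List.cons_append, List.cons.injEq] at heq
      obtain ⟨hx1, hx2, hx3, hrest⟩ := heq
      subst hx1; subst hx2; subst hx3
      have hmpipe : '|' ∉ m := fun hmem => hpipe '|' (by rw [hdq]; simp [hmem]) rfl
      rw [← hrest, pvDropWhile_append_sfx sfx hsfx m]
      -- whether the whole cell after "NaN" is whitespace decides both sides
      have hstrip_iff : m.dropWhile pvIsWS = [] → pvStripW c = ['N', 'a', 'N'] := by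
        intro hm0
        have hmws : ∀ x ∈ m, pvIsWS x = true := List.dropWhile_eq_nil_iff.mp hm0
        unfold pvStripW
        rw [hdq]
        have hrev : ('N' :: 'a' :: 'N' :: m).reverse = m.reverse ++ ['N', 'a', 'N'] := by simp
        rw [hrev, List.dropWhile_append]
        have hnil : (m.reverse.dropWhile pvIsWS) = [] :=
          List.dropWhile_eq_nil_iff.mpr (fun x hx => hmws x (List.mem_reverse.mp hx))
        rw [if_pos (by simp [hnil])]
        rw [List.dropWhile_cons, pvIsWS_N]
        simp
      have hstrip_iff' : m.dropWhile pvIsWS ≠ [] → pvStripW c ≠ ['N', 'a', 'N'] := by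
        intro hm0
        unfold pvStripW
        rw [hdq]
        have hrev : ('N' :: 'a' :: 'N' :: m).reverse = m.reverse ++ ['N', 'a', 'N'] := by simp
        rw [hrev, List.dropWhile_append]
        have hne2 : (m.reverse.dropWhile pvIsWS).isEmpty = false := by
          rw [List.isEmpty_eq_false_iff]
          intro hnil
          exact hm0 (List.dropWhile_eq_nil_iff.mpr (fun x hx =>
            List.dropWhile_eq_nil_iff.mp hnil x (List.mem_reverse.mpr hx)))
        rw [if_neg (by simp [hne2])]
        intro hh
        have hlen := congrArg List.length hh
        simp at hlen
        exact absurd (List.dropWhile_eq_nil_iff.mpr (fun x hx => hlen x (List.mem_reverse.mp hx)))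
          (List.isEmpty_eq_false_iff.mp hne2)
      split
      case h_1 hi =>
        rcases List.append_eq_nil_iff.mp hi with ⟨hm0, hsfx0⟩
        rw [if_pos (hstrip_iff hm0), hsfx0]
      case h_2 t hi =>
        rcases hmd : m.dropWhile pvIsWS with _ | ⟨y, ys⟩
        · rw [hmd, List.nil_append] at hi
          rw [if_pos (hstrip_iff hmd), hi]
        · rw [hmd, List.cons_append] at hi
          have hy : y = '|' := List.head_eq_of_cons_eq hi
          exact absurd hy (fun hh => hmpipe ((List.dropWhile_suffix pvIsWS).subset (by
            rw [hmd, ← hh]; simp)))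
      case h_3 hi1 hi2 =>
        rcases hmd : m.dropWhile pvIsWS with _ | ⟨y, ys⟩
        · rw [hmd, List.nil_append] at hi1 hi2
          rcases hsfx with rfl | ⟨t, rfl⟩
          · exact absurd rfl hi1
          · exact absurd rfl (hi2 t)
        · rw [if_neg (hstrip_iff' (by rw [hmd]; simp))]
  case h_2 hno =>
    rw [if_neg]
    intro hh
    -- pvStripW c = "NaN" forces the cell, hence the scrutinee, to start with "NaN"
    unfold pvStripW at hh
    have h2 : (c.dropWhile pvIsWS).reverse.dropWhile pvIsWS = ['N', 'a', 'N'] := by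
      have h3 := congrArg List.reverse hh
      simpa using h3
    have hsuf : (['N', 'a', 'N'] : List Char) <:+ (c.dropWhile pvIsWS).reverse :=
      h2 ▸ List.dropWhile_suffix pvIsWS
    have hsuf' : (['N', 'a', 'N'] : List Char).reverse <:+ (c.dropWhile pvIsWS).reverse := by
      simpa using hsuf
    have hpre : (['N', 'a', 'N'] : List Char) <+: c.dropWhile pvIsWS :=
      List.reverse_suffix.mp hsuf'
    obtain ⟨m, hm⟩ := hpre
    exact hno (m ++ sfx) (by rw [← hm]; simp)

-- a single-cell scan is exactly the per-cell cleaning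
theorem pvScan_true_some' (u r : List Char) (hu : u ≠ [])
    (h : pvMatchNanCell u = some r) :
    pvCleanLineB true u = ' ' :: pvCleanLineB false r := by
  rcases u with _ | ⟨x, rest⟩
  · exact absurd rfl hu
  · exact pvScan_true_some x rest r h

theorem pvScan_nil (b : Bool) : pvCleanLineB b [] = [] := by rw [pvCleanLineB]

theorem pvScan_single (c : List Char) (hc : '|' ∉ c) :
    pvCleanLineB true c = pvCleanW c := by
  rcases c with _ | ⟨x, xs⟩
  · rw [pvScan_nil]; unfold pvCleanW pvStripW; simp
  · have hmc := pvMatch_char (x :: xs) [] hc (Or.inl rfl)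
    rw [List.append_nil] at hmc
    unfold pvCleanW
    by_cases hs : pvStripW (x :: xs) = ['N', 'a', 'N']
    · rw [if_pos hs] at hmc ⊢
      rw [pvScan_true_some x xs [] hmc, pvScan_nil]
    · rw [if_neg hs] at hmc ⊢
      rw [pvScan_true_none x xs hmc]
      have hx : (x == '|') = false := beq_eq_false_iff_ne.mpr (fun hh => hc (by simp [hh]))
      rw [hx]
      have hcopy := pvScan_copy xs (fun hh => hc (by simp [hh])) []
      rw [pvScan_nil] at hcopy
      simpa using hcopy

-- the scanner over a joined cell list = the per-cell cleaning, joined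
theorem pvScan_intercalate (cells : List (List Char)) (hne : cells ≠ [])
    (hpf : ∀ p ∈ cells, '|' ∉ p) :
    pvCleanLineB true (List.intercalate ['|'] cells) =
      List.intercalate ['|'] (cells.map pvCleanW) := by
  induction cells with
  | nil => exact absurd rfl hne
  | cons c cs ih =>
    rcases cs with _ | ⟨c2, cs'⟩
    · have h1 : List.intercalate ['|'] [c] = c := by simp [List.intercalate]
      have h2 : List.intercalate ['|'] [pvCleanW c] = pvCleanW c := by simp [List.intercalate]
      rw [List.map_cons, List.map_nil, h1, h2]
      exact pvScan_single c (hpf c (by simp))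
    · have hc : '|' ∉ c := hpf c (by simp)
      have hpf' : ∀ p ∈ c2 :: cs', '|' ∉ p := fun p hp => hpf p (by simp [hp])
      have hih := ih (by simp) hpf'
      have hinter : List.intercalate ['|'] (c :: c2 :: cs') =
          c ++ '|' :: List.intercalate ['|'] (c2 :: cs') := by
        simp [List.intercalate]
      have hinter2 : List.intercalate ['|'] ((c :: c2 :: cs').map pvCleanW) =
          pvCleanW c ++ '|' :: List.intercalate ['|'] ((c2 :: cs').map pvCleanW) := by
        rw [List.map_cons]
        simp [List.intercalate]
      rw [hinter, hinter2]
      set t := List.intercalate ['|'] (c2 :: cs') with ht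
      by_cases hs : pvStripW c = ['N', 'a', 'N']
      · have hmc := pvMatch_char c ('|' :: t) hc (Or.inr ⟨t, rfl⟩)
        rw [if_pos hs] at hmc
        rw [pvScan_true_some' _ _ (by simp) hmc, pvScan_false_pipe, hih]
        unfold pvCleanW
        rw [if_pos hs]
        rfl
      · have hmc := pvMatch_char c ('|' :: t) hc (Or.inr ⟨t, rfl⟩)
        rw [if_neg hs] at hmc
        have hcw : pvCleanW c = c := by unfold pvCleanW; rw [if_neg hs]
        rw [hcw]
        rcases c with _ | ⟨x, xs⟩
        · rw [List.nil_append]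
          rw [pvScan_true_none '|' t hmc]
          simp only [BEq.rfl]
          rw [hih]
          simp
        · rw [List.cons_append] at hmc ⊢
          rw [pvScan_true_none x (xs ++ '|' :: t) hmc]
          have hx : (x == '|') = false := beq_eq_false_iff_ne.mpr (fun hh => hc (by simp [hh]))
          rw [hx, pvScan_copy xs (fun hh => hc (by simp [hh])) ('|' :: t), pvScan_false_pipe,
            hih]
          rfl

theorem pvLine_eq (line : List Char) (h : ∀ x ∈ line, pvDomChar x = true) :
    pvCleanLineA line =
      (if PySem.Chars.isIn ['|'] line then pvCleanLineB true line else line) := by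
  unfold pvCleanLineA
  by_cases hg : PySem.Chars.isIn ['|'] line = true
  · rw [if_pos hg, if_pos hg]
    rw [pvSplitOn_eq_splitP]
    have hcells_pf : ∀ p ∈ pvSplitP '|' [] line, '|' ∉ p :=
      pvSplitP_sep_not_mem '|' line [] (by simp)
    have hmap : (pvSplitP '|' [] line).map pvCleanPartA = (pvSplitP '|' [] line).map pvCleanW := by
      apply List.map_congr_left
      intro p hp
      unfold pvCleanPartA pvCleanW
      rw [pvStrip_eq_stripW p (fun x hx => h x (by
        rcases pvMem_splitP '|' line [] p hp x hx with h0 | h0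
        · simp at h0
        · exact h0))]
    unfold PySem.Chars.join
    rw [hmap, ← pvScan_intercalate _ (pvSplitP_ne_nil '|' [] line) hcells_pf,
      pvIntercalate_splitP '|' line [], List.nil_append]
  · rw [if_neg hg, if_neg hg]

-- ===== VERDICT (by name: the statement is the Claim_ definition above) =====
theorem clean_excel_markdown_py_spec : Claim_equal_clean_excel_markdown_py := by
  intro markdown hdom
  unfold Spec_clean_excel_markdown_py
  simp only [clean_excel_markdown_py, clean_excel_markdown_py_alt]
  have hdc : ∀ x ∈ markdown.toList, pvDomChar x = true := by
    intro x hx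
    unfold Dom_clean_excel_markdown_py pvDomStr at hdom
    exact List.all_eq_true.mp hdom x hx
  apply congrArg String.ofList
  apply congrArg (PySem.Chars.join ['\n'])
  apply List.map_congr_left
  intro line hline
  rw [pvSplitOn_eq_splitP] at hline
  apply pvLine_eq
  intro x hx
  apply hdc
  rcases pvMem_splitP '\n' markdown.toList [] line hline x hx with h0 | h0
  · simp at h0
  · exact h0
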